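-- pv_equiv track=rewrite | github.com/Time-Coder/glass | other_resource/md2html/common.py | format_index
-- ===== SOURCE A (Python) =====
-- def get_li(section_map, i):
-- 	result = "<li><div class=\"item-arrow\"></div><a href=\"#section-" + section_map[i][0].replace(".", "-") + "\">" + section_map[i][0] + "&nbsp;&nbsp;" + section_map[i][1] + "</a>"
-- 	current_i = i
-- 	i += 1
--
-- 	result += "\n<ul class=\"index\">\n"
-- 	while i < len(section_map) and len(section_map[i][0].split(".")) > len(section_map[current_i][0].split(".")):
-- 		items = get_li(section_map, i)
-- 		result += items[0]
-- 		i = items[1]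
--
-- 	result += "</ul>\n"
-- 	result += "</li>\n"
-- 	result = result.replace("\n<ul class=\"index\">\n</ul>\n", "")
--
-- 	return result, i
--
-- def format_index(section_map):
-- 	result = "<ul class=\"index\">\n"
-- 	i = 0
-- 	while i < len(section_map):
-- 		li, i = get_li(section_map, i)
-- 		result += li
-- 	result += "</ul>"
-- 	return result
-- ===== SOURCE B (Python) =====
-- # Iterative re-implementation: one pass over section_map with an explicit stack
-- # of open <li> frames instead of get_li's recursion.
--
-- _PAT = "\n<ul class=\"index\">\n</ul>\n"
--
-- def format_index(section_map):
--     stack = []          # frames: [depth, accumulated text of the open <li>]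
--     top = ""            # finished top-level <li> strings
--
--     def close():
--         nonlocal top
--         depth, text = stack.pop()
--         s = (text + "</ul>\n</li>\n").replace(_PAT, "")
--         if stack:
--             stack[-1][1] += s
--         else:
--             top += s
--
--     for name, title in section_map:
--         d = len(name.split("."))
--         while stack and d <= stack[-1][0]:
--             close()
--         opener = ("<li><div class=\"item-arrow\"></div><a href=\"#section-"
--                   + name.replace(".", "-") + "\">" + name
--                   + "&nbsp;&nbsp;" + title + "</a>\n<ul class=\"index\">\n")
--         stack.append([d, opener])
--
--     while stack:
--         close()
--
--     return "<ul class=\"index\">\n" + top + "</ul>"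
-- ===== Notes on version B (the rewrite author's own statement) =====
-- stated objective: alternative
-- what changed: Replaces get_li's recursion (with an inner while loop re-scanning depths) by a single iterative pass over section_map that keeps an explicit stack of open <li> frames, closing frames (with the same empty-<ul> collapse) as shallower sections arrive.
import Mathlib
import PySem

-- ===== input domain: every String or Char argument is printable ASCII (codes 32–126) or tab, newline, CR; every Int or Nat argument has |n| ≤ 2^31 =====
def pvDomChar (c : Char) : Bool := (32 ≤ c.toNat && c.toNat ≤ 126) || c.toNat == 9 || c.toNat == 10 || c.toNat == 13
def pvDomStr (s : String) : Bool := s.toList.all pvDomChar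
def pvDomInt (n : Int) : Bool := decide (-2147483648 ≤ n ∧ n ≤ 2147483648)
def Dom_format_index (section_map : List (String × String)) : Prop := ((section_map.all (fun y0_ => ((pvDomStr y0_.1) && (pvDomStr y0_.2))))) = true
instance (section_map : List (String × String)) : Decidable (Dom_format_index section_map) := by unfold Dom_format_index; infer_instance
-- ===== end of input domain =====

-- B replaces get_li's recursion by a single pass with an explicit stack of open <li> frames (same output, alternative decomposition).

-- ===== PORT A =====
-- A's get_li: the opener string for section_map[i]
def pvLiHeadA (name title : String) : String :=
  "<li><div class=\"item-arrow\"></div><a href=\"#section-" ++ PySem.Str.replace name "." "-"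
    ++ "\">" ++ name ++ "&nbsp;&nbsp;" ++ title ++ "</a>"

-- len(section_map[i][0].split("."))
def pvDepthA (sm : List (String × String)) (i : Nat) : Nat :=
  ((PySem.Str.split? (sm.getD i ("", "")).1 ".").getD []).length

-- get_li and its inner while loop, fueled (the fuel only makes the recursion structural; it never runs out when called from format_index)
mutual
def pvGetLiA (sm : List (String × String)) : Nat → Nat → String × Nat
  | 0, i => ("", i + 1)
  | fuel + 1, i =>
    let e := sm.getD i ("", "")
    let r := pvAloopA sm fuel (i + 1) (pvDepthA sm i)
    (PySem.Str.replace
        (pvLiHeadA e.1 e.2 ++ "\n<ul class=\"index\">\n" ++ r.1 ++ "</ul>\n" ++ "</li>\n")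
        "\n<ul class=\"index\">\n</ul>\n" "",
      r.2)
  termination_by fuel i => (fuel, 0)

def pvAloopA (sm : List (String × String)) : Nat → Nat → Nat → String × Nat
  | 0, i, _ => ("", i)
  | fuel + 1, i, D =>
    if i < sm.length ∧ D < pvDepthA sm i then
      let r := pvGetLiA sm (fuel + 1) i
      let r' := pvAloopA sm fuel r.2 D
      (r.1 ++ r'.1, r'.2)
    else ("", i)
  termination_by fuel i D => (fuel, 1)
end


-- the while loop of format_index
def pvFloopA (sm : List (String × String)) : Nat → Nat → String
  | 0, _ => ""
  | fuel + 1, i =>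
    if i < sm.length then
      let r := pvGetLiA sm (fuel + 1) i
      r.1 ++ pvFloopA sm fuel r.2
    else ""

def format_index (section_map : List (String × String)) : String :=
  "<ul class=\"index\">\n" ++ pvFloopA section_map (section_map.length + 1) 0 ++ "</ul>"

-- ===== PORT B =====
-- close(): pop a frame, collapse an empty child <ul>, append to the parent frame (or to top)
def pvCloseStrB (text : String) : String :=
  PySem.Str.replace (text ++ "</ul>\n</li>\n") "\n<ul class=\"index\">\n</ul>\n" ""

-- while stack and d <= stack[-1][0]: close()
def pvPopWhileB (d : Nat) (st : List (Nat × String)) (top : String) :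
    List (Nat × String) × String :=
  match st with
  | [] => ([], top)
  | (dd, text) :: rest =>
    if d ≤ dd then
      match rest with
      | (d', t') :: r => pvPopWhileB d ((d', t' ++ pvCloseStrB text) :: r) top
      | [] => pvPopWhileB d [] (top ++ pvCloseStrB text)
    else ((dd, text) :: rest, top)
termination_by st.length

-- body of the for loop
def pvStepB (s : List (Nat × String) × String) (e : String × String) :
    List (Nat × String) × String :=
  let d := ((PySem.Str.split? e.1 ".").getD []).length
  let p := pvPopWhileB d s.1 s.2
  ((d, "<li><div class=\"item-arrow\"></div><a href=\"#section-" ++ PySem.Str.replace e.1 "." "-"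
      ++ "\">" ++ e.1 ++ "&nbsp;&nbsp;" ++ e.2 ++ "</a>\n<ul class=\"index\">\n") :: p.1,
   p.2)

-- while stack: close()
def pvCloseAllB (st : List (Nat × String)) (top : String) : String :=
  match st with
  | [] => top
  | (_, text) :: rest =>
    match rest with
    | (d', t') :: r => pvCloseAllB ((d', t' ++ pvCloseStrB text) :: r) top
    | [] => pvCloseAllB [] (top ++ pvCloseStrB text)
termination_by st.length

def format_index_alt (section_map : List (String × String)) : String :=
  let s := section_map.foldl pvStepB ([], "")
  "<ul class=\"index\">\n" ++ pvCloseAllB s.1 s.2 ++ "</ul>"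

-- ===== PRECONDITION & SPEC =====
def Spec_format_index (section_map : List (String × String)) (out : String) : Prop := out = format_index_alt section_map
instance (section_map : List (String × String)) (out : String) : Decidable (Spec_format_index section_map out) := by unfold Spec_format_index; infer_instance

-- ===== CLAIM (what is proved, stated in full; the proofs are below) =====
def Claim_equal_format_index : Prop := ∀ (section_map : List (String × String)), Dom_format_index section_map → Spec_format_index section_map (format_index section_map)

-- ===== LEMMAS AND PROOFS =====

-- the effect of one close() on a stack state, as a function of the closed frame's final text
def pvAfter (rest : List (Nat × String)) (top : String) (s : String) :
    List (Nat × String) × String :=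
  match rest with
  | (d', t') :: r => ((d', t' ++ s) :: r, top)
  | [] => ([], top ++ s)

-- run port B's loop over the remaining items, then unwind the whole stack
def pvFinalB (items : List (String × String)) (st : List (Nat × String)) (top : String) : String :=
  let p := items.foldl pvStepB (st, top)
  pvCloseAllB p.1 p.2

theorem pvCloseAllB_cons (d : Nat) (text : String) (rest : List (Nat × String)) (top : String) :
    pvCloseAllB ((d, text) :: rest) top
      = pvCloseAllB (pvAfter rest top (pvCloseStrB text)).1 (pvAfter rest top (pvCloseStrB text)).2 := by
  cases rest with
  | nil => rw [pvCloseAllB.eq_def]; rfl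
  | cons f r => cases f; rw [pvCloseAllB.eq_def]; rfl

theorem pvPopWhileB_pop (dp d : Nat) (text : String) (rest : List (Nat × String)) (top : String)
    (h : dp ≤ d) :
    pvPopWhileB dp ((d, text) :: rest) top
      = pvPopWhileB dp (pvAfter rest top (pvCloseStrB text)).1 (pvAfter rest top (pvCloseStrB text)).2 := by
  cases rest with
  | nil => rw [pvPopWhileB.eq_def]; dsimp only; rw [if_pos h]; rfl
  | cons f r => cases f; rw [pvPopWhileB.eq_def]; dsimp only; rw [if_pos h]; rfl

theorem pvPopWhileB_stay (dp d : Nat) (text : String) (rest : List (Nat × String)) (top : String)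
    (h : ¬ dp ≤ d) :
    pvPopWhileB dp ((d, text) :: rest) top = ((d, text) :: rest, top) := by
  rw [pvPopWhileB.eq_def]; dsimp only; rw [if_neg h]

-- the index returned by the inner while loop never moves backwards
theorem pvAloopA_le (sm : List (String × String)) :
    ∀ fuel i D, i ≤ (pvAloopA sm fuel i D).2 := by
  intro fuel
  induction fuel with
  | zero => intro i D; simp [pvAloopA]
  | succ f ih =>
    intro i D
    by_cases h : i < sm.length ∧ D < pvDepthA sm i
    · simp only [pvAloopA, h, and_self, if_true]
      have h1 := ih (i + 1) (pvDepthA sm i)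
      have h2 := ih (pvGetLiA sm (f + 1) i).2 D
      have : (pvGetLiA sm (f + 1) i).2 = (pvAloopA sm f (i + 1) (pvDepthA sm i)).2 := by
        simp [pvGetLiA]
      omega
    · simp [pvAloopA, h]

-- literal-concatenation facts and A/B bridge equalities
theorem pvLit1 : ("</a>" : String) ++ "\n<ul class=\"index\">\n" = "</a>\n<ul class=\"index\">\n" := rfl

theorem pvLit2 : ("</ul>\n" : String) ++ "</li>\n" = "</ul>\n</li>\n" := rfl

-- B's fused opener literal equals A's opener followed by the <ul> line
theorem pvOpenB_eq (a b : String) :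
    "<li><div class=\"item-arrow\"></div><a href=\"#section-" ++ PySem.Str.replace a "." "-"
        ++ "\">" ++ a ++ "&nbsp;&nbsp;" ++ b ++ "</a>\n<ul class=\"index\">\n"
      = pvLiHeadA a b ++ "\n<ul class=\"index\">\n" := by
  simp only [pvLiHeadA, String.append_assoc]
  rw [pvLit1]

-- closing a frame whose text is A's opener + <ul> + children gives A's get_li string
theorem pvCloseStrB_open (a b c1 : String) :
    pvCloseStrB (pvLiHeadA a b ++ "\n<ul class=\"index\">\n" ++ c1)
      = PySem.Str.replace
          (pvLiHeadA a b ++ "\n<ul class=\"index\">\n" ++ c1 ++ "</ul>\n" ++ "</li>\n")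
          "\n<ul class=\"index\">\n</ul>\n" "" := by
  unfold pvCloseStrB
  rw [← pvLit2, ← String.append_assoc]

theorem pvGetLiA_succ (sm : List (String × String)) (f i : Nat) :
    pvGetLiA sm (f + 1) i
      = (PySem.Str.replace
          (pvLiHeadA (sm.getD i ("", "")).1 (sm.getD i ("", "")).2 ++ "\n<ul class=\"index\">\n"
            ++ (pvAloopA sm f (i + 1) (pvDepthA sm i)).1 ++ "</ul>\n" ++ "</li>\n")
          "\n<ul class=\"index\">\n</ul>\n" "",
         (pvAloopA sm f (i + 1) (pvDepthA sm i)).2) := by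
  rw [pvGetLiA]

theorem pvAloopA_stop (sm : List (String × String)) (fuel i d : Nat)
    (h : ¬ (i < sm.length ∧ d < pvDepthA sm i)) : pvAloopA sm fuel i d = ("", i) := by
  cases fuel with
  | zero => rw [pvAloopA]
  | succ f => rw [pvAloopA, if_neg h]

theorem pvPopWhileB_nil (d : Nat) (top : String) : pvPopWhileB d [] top = ([], top) := by
  rw [pvPopWhileB.eq_def]

theorem pvAfter_cons (d' : Nat) (t' : String) (r : List (Nat × String)) (top s : String) :
    pvAfter ((d', t') :: r) top s = ((d', t' ++ s) :: r, top) := rfl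

theorem pvAfter_nil (top s : String) : pvAfter [] top s = ([], top ++ s) := rfl

theorem pvFinalB_nil (st : List (Nat × String)) (top : String) :
    pvFinalB [] st top = pvCloseAllB st top := rfl

theorem pvFinalB_cons (x : String × String) (xs : List (String × String))
    (st : List (Nat × String)) (top : String) :
    pvFinalB (x :: xs) st top
      = pvFinalB xs (pvStepB (st, top) x).1 (pvStepB (st, top) x).2 := by
  simp [pvFinalB]

-- the end-of-input case of the invariant
theorem pvG_end (sm : List (String × String)) (fuel i d : Nat) (text : String)
    (rest : List (Nat × String)) (top : String) (hi : sm.length ≤ i) :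
    pvFinalB (sm.drop i) ((d, text) :: rest) top
      = pvFinalB (sm.drop (pvAloopA sm fuel i d).2)
          (pvAfter rest top (pvCloseStrB (text ++ (pvAloopA sm fuel i d).1))).1
          (pvAfter rest top (pvCloseStrB (text ++ (pvAloopA sm fuel i d).1))).2 := by
  have hstop : pvAloopA sm fuel i d = ("", i) := pvAloopA_stop sm fuel i d (by omega)
  rw [hstop]
  have hd : sm.drop i = [] := List.drop_eq_nil_of_le hi
  rw [hd, String.append_empty, pvFinalB_nil, pvFinalB_nil, pvCloseAllB_cons]

-- MAIN INVARIANT: running port B from index i with an open frame (d, text) on the stack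
-- accumulates exactly the get_li strings of A's inner while loop into that frame, closes it,
-- and continues from where the loop stopped.
theorem pvMainG (sm : List (String × String)) :
    ∀ n fuel i d text rest top, sm.length - i ≤ n → sm.length - i ≤ fuel →
      pvFinalB (sm.drop i) ((d, text) :: rest) top
        = pvFinalB (sm.drop (pvAloopA sm fuel i d).2)
            (pvAfter rest top (pvCloseStrB (text ++ (pvAloopA sm fuel i d).1))).1
            (pvAfter rest top (pvCloseStrB (text ++ (pvAloopA sm fuel i d).1))).2 := by
  intro n
  induction n with
  | zero =>
    intro fuel i d text rest top h1 _
    exact pvG_end sm fuel i d text rest top (by omega)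
  | succ n ih =>
    intro fuel i d text rest top h1 h2
    by_cases hi : i < sm.length
    case neg => exact pvG_end sm fuel i d text rest top (by omega)
    have hx : sm[i] :: sm.drop (i + 1) = sm.drop i := List.getElem_cons_drop hi
    have hgetD : sm.getD i ("", "") = sm[i] := List.getD_eq_getElem sm ("", "") hi
    have hdep : ((PySem.Str.split? (sm[i]).1 ".").getD []).length = pvDepthA sm i := by
      rw [pvDepthA, hgetD]
    obtain ⟨f, rfl⟩ : ∃ f, fuel = f + 1 := ⟨fuel - 1, by omega⟩
    by_cases hc : d < pvDepthA sm i
    · -- the item starts a child of the open frame: B pushes, A recurses into get_li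
      have haeq : pvAloopA sm (f + 1) i d
          = ((pvGetLiA sm (f + 1) i).1 ++ (pvAloopA sm f (pvGetLiA sm (f + 1) i).2 d).1,
             (pvAloopA sm f (pvGetLiA sm (f + 1) i).2 d).2) := by
        rw [pvAloopA, if_pos ⟨hi, hc⟩]
      have hj1 : (pvGetLiA sm (f + 1) i).2 = (pvAloopA sm f (i + 1) (pvDepthA sm i)).2 := by
        rw [pvGetLiA_succ]
      have hstep : pvStepB ((d, text) :: rest, top) sm[i]
          = ((pvDepthA sm i, pvLiHeadA (sm[i]).1 (sm[i]).2 ++ "\n<ul class=\"index\">\n")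
              :: (d, text) :: rest, top) := by
        unfold pvStepB
        dsimp only
        rw [hdep, pvPopWhileB_stay _ _ _ _ _ (by omega), pvOpenB_eq]
      have hle1 : i + 1 ≤ (pvAloopA sm f (i + 1) (pvDepthA sm i)).2 :=
        pvAloopA_le sm f (i + 1) (pvDepthA sm i)
      have hs1 : pvCloseStrB ((pvLiHeadA (sm[i]).1 (sm[i]).2 ++ "\n<ul class=\"index\">\n")
            ++ (pvAloopA sm f (i + 1) (pvDepthA sm i)).1) = (pvGetLiA sm (f + 1) i).1 := by
        rw [pvCloseStrB_open, pvGetLiA_succ, hgetD]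
      rw [← hx, pvFinalB_cons, hstep,
        ih f (i + 1) (pvDepthA sm i)
          (pvLiHeadA (sm[i]).1 (sm[i]).2 ++ "\n<ul class=\"index\">\n") ((d, text) :: rest) top
          (by omega) (by omega)]
      rw [pvAfter_cons, hs1,
        ih f (pvAloopA sm f (i + 1) (pvDepthA sm i)).2 d (text ++ (pvGetLiA sm (f + 1) i).1)
          rest top (by omega) (by omega),
        haeq]
      dsimp only
      rw [hj1, show text ++ ((pvGetLiA sm (f + 1) i).1
            ++ (pvAloopA sm f (pvAloopA sm f (i + 1) (pvDepthA sm i)).2 d).1)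
          = text ++ (pvGetLiA sm (f + 1) i).1
            ++ (pvAloopA sm f (pvAloopA sm f (i + 1) (pvDepthA sm i)).2 d).1
          from String.append_assoc.symm]
    · -- the item closes the open frame: B pops it first, A's while loop has already stopped
      have hstop : pvAloopA sm (f + 1) i d = ("", i) :=
        pvAloopA_stop sm (f + 1) i d (by omega)
      rw [hstop]
      dsimp only
      rw [String.append_empty, ← hx, pvFinalB_cons, pvFinalB_cons]
      have hstep2 : pvStepB ((d, text) :: rest, top) sm[i]
          = pvStepB ((pvAfter rest top (pvCloseStrB text)).1,
                     (pvAfter rest top (pvCloseStrB text)).2) sm[i] := by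
        unfold pvStepB
        dsimp only
        rw [hdep, pvPopWhileB_pop _ _ _ _ _ (by omega)]
      rw [hstep2]

-- top level: the whole run equals A's outer while loop output
theorem pvMainT (sm : List (String × String)) :
    ∀ n fuel i top, sm.length - i ≤ n → sm.length - i ≤ fuel →
      pvFinalB (sm.drop i) [] top = top ++ pvFloopA sm fuel i := by
  intro n
  induction n with
  | zero =>
    intro fuel i top h1 _
    have hi : sm.length ≤ i := by omega
    rw [List.drop_eq_nil_of_le hi, pvFinalB_nil]
    cases fuel with
    | zero => rw [pvFloopA, pvCloseAllB, String.append_empty]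
    | succ f => rw [pvFloopA, if_neg (by omega), pvCloseAllB, String.append_empty]
  | succ n ih =>
    intro fuel i top h1 h2
    by_cases hi : i < sm.length
    case neg =>
      have hle : sm.length ≤ i := by omega
      rw [List.drop_eq_nil_of_le hle, pvFinalB_nil]
      cases fuel with
      | zero => rw [pvFloopA, pvCloseAllB, String.append_empty]
      | succ f => rw [pvFloopA, if_neg (by omega), pvCloseAllB, String.append_empty]
    have hx : sm[i] :: sm.drop (i + 1) = sm.drop i := List.getElem_cons_drop hi
    have hgetD : sm.getD i ("", "") = sm[i] := List.getD_eq_getElem sm ("", "") hi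
    have hdep : ((PySem.Str.split? (sm[i]).1 ".").getD []).length = pvDepthA sm i := by
      rw [pvDepthA, hgetD]
    obtain ⟨f, rfl⟩ : ∃ f, fuel = f + 1 := ⟨fuel - 1, by omega⟩
    have hj1 : (pvGetLiA sm (f + 1) i).2 = (pvAloopA sm f (i + 1) (pvDepthA sm i)).2 := by
      rw [pvGetLiA_succ]
    have hle1 : i + 1 ≤ (pvAloopA sm f (i + 1) (pvDepthA sm i)).2 :=
      pvAloopA_le sm f (i + 1) (pvDepthA sm i)
    have hstep : pvStepB ([], top) sm[i]
        = ([(pvDepthA sm i, pvLiHeadA (sm[i]).1 (sm[i]).2 ++ "\n<ul class=\"index\">\n")], top) := by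
      unfold pvStepB
      dsimp only
      rw [hdep, pvPopWhileB_nil, pvOpenB_eq]
    have hs1 : pvCloseStrB ((pvLiHeadA (sm[i]).1 (sm[i]).2 ++ "\n<ul class=\"index\">\n")
          ++ (pvAloopA sm f (i + 1) (pvDepthA sm i)).1) = (pvGetLiA sm (f + 1) i).1 := by
      rw [pvCloseStrB_open, pvGetLiA_succ, hgetD]
    rw [← hx, pvFinalB_cons, hstep,
      pvMainG sm n f (i + 1) (pvDepthA sm i)
        (pvLiHeadA (sm[i]).1 (sm[i]).2 ++ "\n<ul class=\"index\">\n") [] top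
        (by omega) (by omega)]
    rw [pvAfter_nil, hs1, ih f (pvAloopA sm f (i + 1) (pvDepthA sm i)).2 (top ++ (pvGetLiA sm (f + 1) i).1)
        (by omega) (by omega)]
    rw [pvFloopA, if_pos hi]
    dsimp only
    rw [hj1, String.append_assoc]

-- ===== VERDICT (by name: the statement is the Claim_ definition above) =====
theorem format_index_spec : Claim_equal_format_index := by
  intro sm _
  unfold Spec_format_index format_index format_index_alt
  have h := pvMainT sm sm.length (sm.length + 1) 0 "" (by omega) (by omega)
  rw [List.drop_zero] at h
  simp only [pvFinalB] at h
  dsimp only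
  rw [h]
  simp
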